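-- pv_equiv track=rewrite | github.com/adorogensky/sandbox | python/problems/c.py | largest_unique_element
-- ===== SOURCE A (Python) =====
-- def largest_unique_element(arr):
--     i = len(arr) - 1
--     while i >= 0:
--         if i == 0 or arr[i] != arr[i - 1]:
--             return arr[i]
--         while i > 0 and arr[i] == arr[i - 1]:
--             i -= 1
--         i -= 1
--     return -1
-- ===== SOURCE B (Python) =====
-- def largest_unique_element(arr):
--     ans = -1
--     cur = None
--     count = 0
--     for x in arr:
--         if cur is not None and x == cur:
--             count += 1
--         else:
--             if count == 1:
--                 ans = cur
--             cur = x
--             count = 1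
--     if count == 1:
--         ans = cur
--     return ans
-- ===== Notes on version B (the rewrite author's own statement) =====
-- stated objective: alternative
-- what changed: A scans right-to-left with an index and an inner run-skipping while loop; B is a single left-to-right pass that tracks the current run length and keeps the last singleton-run value in an accumulator.
import Mathlib
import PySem

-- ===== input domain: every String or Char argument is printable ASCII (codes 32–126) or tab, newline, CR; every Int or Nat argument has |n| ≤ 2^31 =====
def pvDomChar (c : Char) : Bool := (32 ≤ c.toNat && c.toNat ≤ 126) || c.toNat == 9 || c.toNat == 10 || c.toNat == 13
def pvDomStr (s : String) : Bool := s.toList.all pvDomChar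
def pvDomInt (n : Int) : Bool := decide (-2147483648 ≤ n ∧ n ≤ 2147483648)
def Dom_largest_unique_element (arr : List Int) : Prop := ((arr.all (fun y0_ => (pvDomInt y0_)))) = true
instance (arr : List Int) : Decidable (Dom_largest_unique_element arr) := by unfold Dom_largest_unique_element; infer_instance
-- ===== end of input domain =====

-- ===== PORT A =====
-- B changes the traversal: a single left-to-right pass instead of A's right-to-left
-- index scan with an inner run-skipping loop (objective: alternative; same cost).
-- All of A's index accesses are in range, so `List.getD _ _ 0` returns exactly arr[i].

-- inner `while i > 0 and arr[i] == arr[i-1]: i -= 1` of A; returns the final i + the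
-- trailing `i -= 1` folded in (i.e. the value of i+1 after the loop ends is pvSkipA's result)
def pvSkipA (arr : List Int) : Nat → Nat
  | 0 => 0
  | j+1 => if arr.getD (j+1) 0 = arr.getD j 0 then pvSkipA arr j else j+1

theorem pvSkipA_le (arr : List Int) (j : Nat) : pvSkipA arr j ≤ j := by
  induction j with
  | zero => simp [pvSkipA]
  | succ k ih =>
    simp only [pvSkipA]
    split
    · exact Nat.le_succ_of_le ih
    · exact Nat.le_refl _

-- outer `while i >= 0` of A, with n = i + 1 (n = 0 ↔ the loop has exited)
def pvLoopA (arr : List Int) : Nat → Int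
  | 0 => -1
  | i+1 =>
    if i = 0 ∨ arr.getD i 0 ≠ arr.getD (i-1) 0 then arr.getD i 0
    else pvLoopA arr (pvSkipA arr i)
  termination_by n => n
  decreasing_by exact Nat.lt_succ_of_le (pvSkipA_le _ _)

def largest_unique_element (arr : List Int) : Int := pvLoopA arr arr.length

-- ===== PORT B =====
-- one step of B's for loop over state (ans, cur, count)
def pvStepB (st : Int × Option Int × Int) (x : Int) : Int × Option Int × Int :=
  match st with
  | (ans, cur, count) =>
    match cur with
    | some c =>
      if x = c then (ans, some c, count + 1)
      else ((if count = 1 then c else ans), some x, 1)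
    | none => (ans, some x, 1)

def largest_unique_element_alt (arr : List Int) : Int :=
  match arr.foldl pvStepB (-1, none, 0) with
  | (ans, cur, count) =>
    -- final `if count == 1: ans = cur`; when count == 1 the Python cur is an int
    if count = 1 then cur.getD ans else ans

-- ===== PRECONDITION & SPEC =====
def Spec_largest_unique_element (arr : List Int) (out : Int) : Prop := out = largest_unique_element_alt arr
instance (arr : List Int) (out : Int) : Decidable (Spec_largest_unique_element arr out) := by unfold Spec_largest_unique_element; infer_instance

-- ===== CLAIM (what is proved, stated in full; the proofs are below) =====
def Claim_equal_largest_unique_element : Prop := ∀ (arr : List Int), Dom_largest_unique_element arr → Spec_largest_unique_element arr (largest_unique_element arr)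

-- ===== LEMMAS AND PROOFS =====

-- the common specification: value of the rightmost length-1 run, over the REVERSED list
def pvH : List Int → Option Int
  | [] => none
  | x :: xs =>
    if xs.head? = some x then pvH (xs.dropWhile (· == x)) else some x
  termination_by l => l.length
  decreasing_by
    exact Nat.lt_succ_of_le (List.length_dropWhile_le _ _)

theorem pvTake_reverse_succ (arr : List Int) (i : Nat) (h : i < arr.length) :
    (arr.take (i+1)).reverse = arr.getD i 0 :: (arr.take i).reverse := by
  rw [List.take_succ, List.getElem?_eq_getElem h]
  simp [List.getD, List.getElem?_eq_getElem h]

theorem pvSkipA_spec (arr : List Int) (i : Nat) (h : i < arr.length) :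
    ((arr.take i).reverse).dropWhile (· == arr.getD i 0) = (arr.take (pvSkipA arr i)).reverse := by
  induction i with
  | zero => simp [pvSkipA]
  | succ k ih =>
    have hk : k < arr.length := Nat.lt_of_succ_lt h
    rw [pvTake_reverse_succ arr k hk]
    simp only [pvSkipA]
    by_cases heq : arr.getD (k+1) 0 = arr.getD k 0
    · rw [if_pos heq, List.dropWhile_cons]
      have hb : (arr.getD k 0 == arr.getD (k + 1) 0) = true := by
        rw [heq]; exact beq_self_eq_true _
      rw [hb, if_pos rfl, heq]
      exact ih hk
    · rw [if_neg heq, List.dropWhile_cons]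
      have hb : (arr.getD k 0 == arr.getD (k+1) 0) = false := by
        simp only [beq_eq_false_iff_ne, ne_eq]
        exact fun h => heq h.symm
      rw [hb]
      simp only [Bool.false_eq_true, if_false]
      rw [pvTake_reverse_succ arr k hk]

theorem pvLoopA_spec (arr : List Int) (n : Nat) (h : n ≤ arr.length) :
    pvLoopA arr n = (pvH ((arr.take n).reverse)).getD (-1) := by
  induction n using Nat.strong_induction_on with
  | _ n ih =>
    match n, h with
    | 0, _ => simp [pvLoopA, pvH]
    | i+1, h =>
      have hi : i < arr.length := h
      rw [pvTake_reverse_succ arr i hi]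
      have hhead : ((arr.take i).reverse).head? =
          if i = 0 then none else some (arr.getD (i-1) 0) := by
        cases i with
        | zero => simp
        | succ k =>
          rw [pvTake_reverse_succ arr k (Nat.lt_of_succ_lt hi)]
          simp
      simp only [pvLoopA, pvH]
      by_cases hc : i = 0 ∨ arr.getD i 0 ≠ arr.getD (i-1) 0
      · rw [if_pos hc]
        have : ¬ ((arr.take i).reverse).head? = some (arr.getD i 0) := by
          rw [hhead]
          rcases hc with h0 | hne
          · simp [h0]
          · cases i with
            | zero => simp
            | succ k => simp; intro hx; exact absurd hx.symm hne
        rw [if_neg this]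
        simp
      · rw [if_neg hc]
        have h0 : ¬ i = 0 := fun h => hc (Or.inl h)
        have heq : arr.getD i 0 = arr.getD (i-1) 0 := by
          by_contra h; exact hc (Or.inr h)
        have : ((arr.take i).reverse).head? = some (arr.getD i 0) := by
          rw [hhead, if_neg h0, heq]
        rw [if_pos this]
        rw [pvSkipA_spec arr i hi]
        exact ih (pvSkipA arr i) (Nat.lt_succ_of_le (pvSkipA_le arr i))
          (le_trans (pvSkipA_le arr i) (Nat.le_of_lt hi))

-- invariant of B's fold, phrased over the reversed processed prefix
def pvInvB (l : List Int) : Int × Option Int × Int :=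
  match l.reverse with
  | [] => (-1, none, 0)
  | y :: ys =>
    ((pvH (ys.dropWhile (· == y))).getD (-1), some y,
      (1 : Int) + ((ys.takeWhile (· == y)).length : Int))

theorem pvFoldB_inv (l : List Int) :
    l.foldl pvStepB (-1, none, 0) = pvInvB l := by
  induction l using List.reverseRecOn with
  | nil => simp [pvInvB]
  | append_singleton l a ihl =>
    rw [List.foldl_append, ihl]
    simp only [List.foldl]
    unfold pvInvB
    rw [List.reverse_append]
    simp only [List.reverse_singleton, List.singleton_append]
    cases hrev : l.reverse with
    | nil => simp [pvStepB, pvH]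
    | cons y ys =>
      simp only [pvStepB]
      by_cases hay : a = y
      · rw [if_pos hay]
        subst hay
        simp only [List.takeWhile_cons, List.dropWhile_cons, BEq.rfl,
          Prod.mk.injEq]
        refine ⟨rfl, by simp, ?_⟩
        push_cast [List.length_cons]
        ring
      · rw [if_neg hay]
        have hya : (y == a) = false := by simp [Ne.symm hay]
        simp only [List.takeWhile_cons, List.dropWhile_cons, hya,
          Bool.false_eq_true, if_false, List.length_nil,
          Nat.cast_zero, add_zero, Prod.mk.injEq]
        refine ⟨?_, by simp⟩
        by_cases hcnt : (1 : Int) + ((ys.takeWhile (· == y)).length : Int) = 1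
        · rw [if_pos hcnt]
          have htw : ys.takeWhile (· == y) = [] := by
            have : ((ys.takeWhile (· == y)).length : Int) = 0 := by omega
            have : (ys.takeWhile (· == y)).length = 0 := by exact_mod_cast this
            exact List.eq_nil_of_length_eq_zero this
          have hhd : ¬ ys.head? = some y := by
            cases ys with
            | nil => simp
            | cons z zs =>
              simp only [List.head?_cons, Option.some.injEq]
              intro hzy
              subst hzy
              simp at htw
          rw [pvH]
          rw [if_neg hhd]
          rfl
        · rw [if_neg hcnt]
          have htw : ys.takeWhile (· == y) ≠ [] := by
            intro hnil
            rw [hnil] at hcnt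
            simp at hcnt
          have hhd : ys.head? = some y := by
            cases ys with
            | nil => simp at htw
            | cons z zs =>
              simp only [List.takeWhile_cons] at htw
              by_cases hzy : z = y
              · simp [hzy]
              · simp [hzy] at htw
          conv_rhs => rw [pvH]
          rw [if_pos hhd]

theorem pvAltB_spec (arr : List Int) :
    largest_unique_element_alt arr = (pvH arr.reverse).getD (-1) := by
  unfold largest_unique_element_alt
  rw [pvFoldB_inv]
  unfold pvInvB
  cases hrev : arr.reverse with
  | nil => simp [pvH]
  | cons y ys =>
    simp only []
    by_cases hcnt : (1 : Int) + ((ys.takeWhile (· == y)).length : Int) = 1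
    · rw [if_pos hcnt]
      have htw : ys.takeWhile (· == y) = [] := by
        have : ((ys.takeWhile (· == y)).length : Int) = 0 := by omega
        have : (ys.takeWhile (· == y)).length = 0 := by exact_mod_cast this
        exact List.eq_nil_of_length_eq_zero this
      have hhd : ¬ ys.head? = some y := by
        cases ys with
        | nil => simp
        | cons z zs =>
          simp only [List.head?_cons, Option.some.injEq]
          intro hzy
          subst hzy
          simp at htw
      rw [pvH, if_neg hhd]
      rfl
    · rw [if_neg hcnt]
      have htw : ys.takeWhile (· == y) ≠ [] := by
        intro hnil; rw [hnil] at hcnt; simp at hcnt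
      have hhd : ys.head? = some y := by
        cases ys with
        | nil => simp at htw
        | cons z zs =>
          simp only [List.takeWhile_cons] at htw
          by_cases hzy : z = y
          · simp [hzy]
          · simp [hzy] at htw
      rw [pvH, if_pos hhd]

-- ===== VERDICT (by name: the statement is the Claim_ definition above) =====
theorem largest_unique_element_spec : Claim_equal_largest_unique_element := by
  intro arr _
  unfold Spec_largest_unique_element
  unfold largest_unique_element
  rw [pvLoopA_spec arr arr.length (Nat.le_refl _), pvAltB_spec]
  rw [List.take_length]
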